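-- pv_equiv track=rewrite | github.com/aabderrafie/PhantomLFI | core/encoders.py | unicode_encode
-- ===== SOURCE A (Python) =====
-- def unicode_encode(payload: str) -> str:
--     """Apply overlong UTF-8 encoding for bypass attempts."""
--     replacements = {
--         ".": "%c0%2e",
--         "/": "%c0%af",
--         "\\": "%c1%9c",
--     }
--     result = payload
--     for char, encoded in replacements.items():
--         result = result.replace(char, encoded)
--     return result
-- ===== SOURCE B (Python) =====
-- def unicode_encode(payload: str) -> str:
--     """Apply overlong UTF-8 encoding for bypass attempts."""
--     parts = []
--     for c in payload:
--         if c == ".":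
--             parts.append("%c0%2e")
--         elif c == "/":
--             parts.append("%c0%af")
--         elif c == "\\":
--             parts.append("%c1%9c")
--         else:
--             parts.append(c)
--     return "".join(parts)
-- ===== Notes on version B (the rewrite author's own statement) =====
-- stated objective: alternative
-- what changed: Replaces three sequential full-string str.replace passes (and the dict of replacements) with a single left-to-right loop that appends each character's encoding (chosen by an if/elif chain) to a parts list and joins once at the end.
import Mathlib
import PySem

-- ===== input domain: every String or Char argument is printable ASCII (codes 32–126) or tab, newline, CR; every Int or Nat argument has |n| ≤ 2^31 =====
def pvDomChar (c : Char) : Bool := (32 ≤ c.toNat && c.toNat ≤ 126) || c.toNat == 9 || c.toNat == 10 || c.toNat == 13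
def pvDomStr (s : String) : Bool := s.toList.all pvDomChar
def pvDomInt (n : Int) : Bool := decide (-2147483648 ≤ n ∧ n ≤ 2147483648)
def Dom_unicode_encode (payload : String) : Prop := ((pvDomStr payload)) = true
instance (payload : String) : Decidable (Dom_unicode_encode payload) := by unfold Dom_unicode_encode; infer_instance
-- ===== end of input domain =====

-- B replaces A's three sequential str.replace passes (driven by a dict) by one left-to-right pass that appends each character's encoding, chosen by an if/elif chain, to a parts list joined once at the end (alternative decomposition, same output since no replacement value contains a key char).

-- ===== PORT A =====
def unicode_encode (payload : String) : String :=
  let replacements : PySem.Dict String String :=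
    PySem.Dict.ofList [(".", "%c0%2e"), ("/", "%c0%af"), ("\\", "%c1%9c")]
  replacements.items.foldl (fun result ce => PySem.Str.replace result ce.1 ce.2) payload

-- ===== PORT B =====
def unicode_encode_alt (payload : String) : String :=
  let parts : List String :=
    payload.toList.foldl
      (fun parts c =>
        if c = '.' then parts ++ ["%c0%2e"]
        else if c = '/' then parts ++ ["%c0%af"]
        else if c = '\\' then parts ++ ["%c1%9c"]
        else parts ++ [String.singleton c])
      []
  PySem.Str.join "" parts

-- ===== PRECONDITION & SPEC =====
def Spec_unicode_encode (payload : String) (out : String) : Prop := out = unicode_encode_alt payload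
instance (payload : String) (out : String) : Decidable (Spec_unicode_encode payload out) := by unfold Spec_unicode_encode; infer_instance

-- ===== CLAIM (what is proved, stated in full; the proofs are below) =====
def Claim_equal_unicode_encode : Prop := ∀ (payload : String), Dom_unicode_encode payload → Spec_unicode_encode payload (unicode_encode payload)

-- ===== LEMMAS AND PROOFS =====

-- single-character substitution, the common normal form of both ports
def pvEncChar (c : Char) : List Char :=
  if c = '.' then "%c0%2e".toList
  else if c = '/' then "%c0%af".toList
  else if c = '\\' then "%c1%9c".toList
  else [c]

def pvSub (c : Char) (new : List Char) (s : List Char) : List Char :=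
  s.flatMap (fun x => if x = c then new else [x])

theorem pv_go_single (c : Char) (new : List Char) :
    ∀ (fuel : Nat) (l acc : List Char), l.length ≤ fuel →
      PySem.Chars.replace.go [c] new fuel l acc = acc.reverse ++ pvSub c new l := by
  intro fuel
  induction fuel with
  | zero =>
    intro l acc h
    have hl : l = [] := List.eq_nil_of_length_eq_zero (Nat.le_zero.mp h)
    subst hl
    simp [PySem.Chars.replace.go, pvSub]
  | succ n ih =>
    intro l acc h
    cases l with
    | nil => simp [PySem.Chars.replace.go, pvSub]
    | cons x t =>
      by_cases hx : x = c
      · subst hx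
        have : [x].isPrefixOf (x :: t) = true := by simp [List.isPrefixOf]
        simp only [PySem.Chars.replace.go, this, if_true]
        rw [show List.drop [x].length (x :: t) = t from rfl,
            ih t (new.reverse ++ acc) (by simpa using Nat.le_of_succ_le_succ h)]
        simp [pvSub]
      · have : [c].isPrefixOf (x :: t) = false := by
          simp [List.isPrefixOf]
          exact fun hc => absurd hc.symm hx
        simp only [PySem.Chars.replace.go, this]
        rw [ih t (x :: acc) (by simpa using Nat.le_of_succ_le_succ h)]
        simp [pvSub, hx]

theorem pv_replace_single (c : Char) (new : List Char) (s : List Char) :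
    PySem.Chars.replace s [c] new = pvSub c new s := by
  have := pv_go_single c new s.length s [] (le_refl _)
  simpa [PySem.Chars.replace] using this

-- the three passes compose to the per-character map (replacement values contain no key char)
theorem pv_comp3 (s : List Char) :
    pvSub '\\' "%c1%9c".toList (pvSub '/' "%c0%af".toList (pvSub '.' "%c0%2e".toList s))
      = s.flatMap pvEncChar := by
  induction s with
  | nil => simp [pvSub]
  | cons x t ih =>
    have hcons : ∀ (c : Char) (new : List Char) (y : Char) (r : List Char),
        pvSub c new (y :: r) = (if y = c then new else [y]) ++ pvSub c new r := by
      intro c new y r; simp [pvSub]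
    have happ : ∀ (c : Char) (new : List Char) (a b : List Char),
        pvSub c new (a ++ b) = pvSub c new a ++ pvSub c new b := by
      intro c new a b; simp [pvSub]
    by_cases h1 : x = '.'
    · subst h1
      rw [hcons, if_pos rfl, happ, happ, ih]
      simp [pvEncChar, pvSub]
    · by_cases h2 : x = '/'
      · subst h2
        rw [hcons, if_neg (by decide), happ, happ, ih]
        simp [pvEncChar, pvSub]
      · by_cases h3 : x = '\\'
        · subst h3
          rw [hcons, if_neg (by decide), happ, happ, ih]
          simp [pvEncChar, pvSub]
        · rw [hcons, if_neg h1, happ, happ, ih]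
          simp [pvSub, pvEncChar, h1, h2, h3]

-- joining with the empty separator is flattening
theorem pv_join_nil_flatten (ls : List (List Char)) :
    PySem.Chars.join [] ls = ls.flatten := by
  induction ls with
  | nil => simp [PySem.Chars.join_nil]
  | cons a t ih =>
    cases t with
    | nil => simp [PySem.Chars.join_singleton]
    | cons b u =>
      rw [PySem.Chars.join_cons_cons]
      simp [ih]

-- B's per-character encoding string has pvEncChar as its char list
def pvEncStr (c : Char) : String :=
  if c = '.' then "%c0%2e"
  else if c = '/' then "%c0%af"
  else if c = '\\' then "%c1%9c"
  else String.singleton c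

theorem pv_encStr_toList (c : Char) : (pvEncStr c).toList = pvEncChar c := by
  by_cases h1 : c = '.'
  · subst h1; decide
  · by_cases h2 : c = '/'
    · subst h2; decide
    · by_cases h3 : c = '\\'
      · subst h3; decide
      · simp [pvEncStr, pvEncChar, h1, h2, h3, String.singleton]

-- B's append-accumulating fold builds the map of pvEncStr
theorem pv_foldl_parts (l : List Char) :
    ∀ (acc : List String),
      l.foldl
        (fun parts c =>
          if c = '.' then parts ++ ["%c0%2e"]
          else if c = '/' then parts ++ ["%c0%af"]
          else if c = '\\' then parts ++ ["%c1%9c"]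
          else parts ++ [String.singleton c])
        acc = acc ++ l.map pvEncStr := by
  induction l with
  | nil => intro acc; simp
  | cons x t ih =>
    intro acc
    simp only [List.foldl_cons, List.map_cons]
    rw [ih]
    by_cases h1 : x = '.'
    · simp [h1, pvEncStr]
    · by_cases h2 : x = '/'
      · simp [h2, pvEncStr]
      · by_cases h3 : x = '\\'
        · simp [h3, pvEncStr]
        · simp [h1, h2, h3, pvEncStr]

theorem pv_a_eq (payload : String) :
    (unicode_encode payload).toList = payload.toList.flatMap pvEncChar := by
  have hA : unicode_encode payload =
      PySem.Str.replace (PySem.Str.replace (PySem.Str.replace payload "." "%c0%2e") "/" "%c0%af")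
        "\\" "%c1%9c" := rfl
  rw [hA]
  simp only [PySem.Str.toList_replace]
  have d1 : (("." : String)).toList = ['.'] := rfl
  have d2 : (("/" : String)).toList = ['/'] := rfl
  have d3 : (("\\" : String)).toList = ['\\'] := rfl
  rw [d1, d2, d3, pv_replace_single, pv_replace_single, pv_replace_single, pv_comp3]

theorem pv_b_eq (payload : String) :
    (unicode_encode_alt payload).toList = payload.toList.flatMap pvEncChar := by
  show (PySem.Str.join "" _).toList = _
  rw [pv_foldl_parts payload.toList []]
  rw [PySem.Str.toList_join]
  have hsep : ("" : String).toList = ([] : List Char) := rfl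
  rw [hsep, pv_join_nil_flatten]
  rw [List.nil_append, List.map_map, List.flatten_eq_flatMap, List.flatMap_map]
  apply List.flatMap_congr
  intro c _
  simpa using pv_encStr_toList c

-- ===== VERDICT (by name: the statement is the Claim_ definition above) =====
theorem unicode_encode_spec : Claim_equal_unicode_encode := by
  intro payload _
  unfold Spec_unicode_encode
  rw [← String.toList_inj, pv_a_eq, pv_b_eq]
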